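-- pv_equiv track=rewrite | github.com/Doldolee/MORE-CLEAR | dataset/util.py | impute_notes_with_background
-- ===== SOURCE A (Python) =====
-- def impute_notes_with_background(notes, done, missing='no clinical note'):
--
--     imputed = []
--     first_valid = None
--
--     for note, is_done in zip(notes, done):
--         if first_valid is None and note != missing:
--             first_valid = f"[background] {note}"
--
--         if first_valid is not None:
--             if note == missing:
--                 imputed_note = first_valid
--             else:
--                 imputed_note = f"{first_valid} || {note}"
--         else:
--             imputed_note = note
--
--         imputed.append(imputed_note)
--
--         if is_done:
--             first_valid = None
--
--     return imputed
-- ===== SOURCE B (Python) =====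
-- def impute_notes_with_background(notes, done, missing='no clinical note'):
--     out = []
--     pairs = list(zip(notes, done))
--     while pairs:
--         seg, pairs = _split_segment(pairs)
--         out.extend(_impute_segment(seg, missing))
--     return out
--
--
-- def _split_segment(pairs):
--     # segment ends at (and includes) the first is_done=True element
--     for i, (_, is_done) in enumerate(pairs):
--         if is_done:
--             return pairs[:i + 1], pairs[i + 1:]
--     return pairs, []
--
--
-- def _impute_segment(seg, missing):
--     # k = length of the maximal prefix of missing notes
--     k = 0
--     while k < len(seg) and seg[k][0] == missing:
--         k += 1
--     if k == len(seg):
--         return [n for n, _ in seg]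
--     fv = f"[background] {seg[k][0]}"
--     return [missing] * k + [fv if n == missing else f"{fv} || {n}" for n, _ in seg[k:]]
-- ===== Notes on version B (the rewrite author's own statement) =====
-- stated objective: alternative
-- what changed: B splits the zipped (note, is_done) sequence into done-terminated segments and imputes each segment independently from its precomputed first valid note, instead of A's single pass threading an Optional first_valid accumulator.
import Mathlib
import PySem

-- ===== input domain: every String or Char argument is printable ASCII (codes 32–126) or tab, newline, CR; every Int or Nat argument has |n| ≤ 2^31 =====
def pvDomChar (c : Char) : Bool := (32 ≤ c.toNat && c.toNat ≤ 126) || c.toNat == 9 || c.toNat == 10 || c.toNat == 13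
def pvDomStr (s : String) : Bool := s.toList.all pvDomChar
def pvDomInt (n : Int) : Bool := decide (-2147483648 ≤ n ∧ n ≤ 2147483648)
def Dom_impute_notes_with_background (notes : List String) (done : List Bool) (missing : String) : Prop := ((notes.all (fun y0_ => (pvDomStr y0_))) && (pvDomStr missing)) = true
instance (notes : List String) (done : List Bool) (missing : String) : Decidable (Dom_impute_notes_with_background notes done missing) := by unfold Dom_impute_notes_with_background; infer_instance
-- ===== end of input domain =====

-- B imputes segment-by-segment (split at done flags, first valid note found per segment)
-- instead of A's single stateful pass; objective: alternative decomposition, same cost.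

-- ===== PORT A =====
-- A's loop over zip(notes, done), carrying the Optional first_valid and appending one
-- imputed note per element (append-to-accumulator rendered as cons-recursion).
def aLoop (ps : List (String × Bool)) (fv : Option String) (missing : String) : List String :=
  match ps with
  | [] => []
  | (note, isDone) :: rest =>
    let fv1 : Option String :=
      match fv with
      | none => if note ≠ missing then some ("[background] " ++ note) else none
      | some v => some v
    let out : String :=
      match fv1 with
      | some v => if note = missing then v else v ++ " || " ++ note
      | none => note
    out :: aLoop rest (if isDone then none else fv1) missing

def impute_notes_with_background (notes : List String) (done : List Bool) (missing : String) : List String :=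
  aLoop (notes.zip done) none missing

-- ===== PORT B =====
-- _split_segment: segment ends at (and includes) the first is_done=True element.
def splitSegment (ps : List (String × Bool)) : List (String × Bool) × List (String × Bool) :=
  match ps with
  | [] => ([], [])
  | p :: rest =>
    if p.2 then ([p], rest)
    else
      let (s, r) := splitSegment rest
      (p :: s, r)

-- _impute_segment: k = length of the maximal prefix of missing notes (takeWhile),
-- then [missing]*k ++ the mapped tail seg[k:].
def imputeSegment (seg : List (String × Bool)) (missing : String) : List String :=
  let post := seg.dropWhile (fun p => p.1 = missing)
  match post with
  | [] => seg.map Prod.fst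
  | (n, _) :: _ =>
    let fv := "[background] " ++ n
    List.replicate (seg.takeWhile (fun p => p.1 = missing)).length missing ++
      post.map (fun p => if p.1 = missing then fv else fv ++ " || " ++ p.1)

theorem splitSegment_snd_length_le (ps : List (String × Bool)) :
    (splitSegment ps).2.length ≤ ps.length := by
  induction ps with
  | nil => simp [splitSegment]
  | cons p rest ih =>
    simp only [splitSegment]
    split
    · simp
    · simpa using Nat.le_succ_of_le ih

-- B's outer while-loop over the remaining pairs.
def bGo (ps : List (String × Bool)) (missing : String) : List String :=
  match ps with
  | [] => []
  | p :: t =>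
    let pr := splitSegment (p :: t)
    imputeSegment pr.1 missing ++ bGo pr.2 missing
termination_by ps.length
decreasing_by
  simp only [splitSegment]
  split
  · simpa using Nat.lt_succ_of_le (Nat.le_refl _)
  · exact Nat.lt_succ_of_le (by simpa using splitSegment_snd_length_le t)

def impute_notes_with_background_alt (notes : List String) (done : List Bool) (missing : String) : List String :=
  bGo (notes.zip done) missing

-- ===== PRECONDITION & SPEC =====
def Spec_impute_notes_with_background (notes : List String) (done : List Bool) (missing : String) (out : List String) : Prop := out = impute_notes_with_background_alt notes done missing
instance (notes : List String) (done : List Bool) (missing : String) (out : List String) : Decidable (Spec_impute_notes_with_background notes done missing out) := by unfold Spec_impute_notes_with_background; infer_instance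

-- ===== CLAIM (what is proved, stated in full; the proofs are below) =====
def Claim_equal_impute_notes_with_background : Prop := ∀ (notes : List String) (done : List Bool) (missing : String), Dom_impute_notes_with_background notes done missing → Spec_impute_notes_with_background notes done missing (impute_notes_with_background notes done missing)

-- ===== LEMMAS AND PROOFS =====

-- A's loop with first_valid = some fv matches B's per-segment map until the segment ends.
theorem aLoop_some (t : List (String × Bool)) (fv missing : String) :
    aLoop t (some fv) missing =
      (splitSegment t).1.map (fun p => if p.1 = missing then fv else fv ++ " || " ++ p.1) ++
        aLoop (splitSegment t).2 none missing := by
  induction t with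
  | nil => simp [aLoop, splitSegment]
  | cons p t' ih =>
    obtain ⟨m, e⟩ := p
    by_cases he : e
    · subst he; simp [aLoop, splitSegment]
    · simp only [aLoop, splitSegment, he, if_neg, Bool.false_eq_true, not_false_iff]
      simp [ih]

theorem imputeSegment_cons_missing (d : Bool) (s : List (String × Bool)) (missing : String) :
    imputeSegment ((missing, d) :: s) missing = missing :: imputeSegment s missing := by
  simp only [imputeSegment, List.dropWhile, List.takeWhile]
  simp only [decide_true, if_true]
  cases h : s.dropWhile (fun p => p.1 = missing) with
  | nil => simp [h]
  | cons q r => simp [h, List.replicate_succ]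

theorem aLoop_eq_bGo (ps : List (String × Bool)) (missing : String) :
    aLoop ps none missing = bGo ps missing := by
  induction hn : ps.length using Nat.strong_induction_on generalizing ps with
  | _ n IH =>
  match ps, hn with
  | [], _ => simp [aLoop, bGo]
  | (note, d) :: t, hn =>
    have hnt : t.length + 1 = n := by simpa using hn
    have ht : aLoop t none missing = bGo t missing :=
      IH t.length (by omega) t rfl
    by_cases hd : d
    · subst hd
      by_cases hm : note = missing
      · simp [aLoop, bGo, splitSegment, imputeSegment, hm, ht]
      · simp [aLoop, bGo, splitSegment, imputeSegment, hm, ht]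
    · by_cases hm : note = missing
      · have hA : aLoop ((note, d) :: t) none missing = missing :: aLoop t none missing := by
          simp [aLoop, hm, hd]
        rw [hA, ht]
        cases t with
        | nil => simp [bGo, splitSegment, imputeSegment, hd, hm]
        | cons q t' =>
          conv_rhs => rw [bGo]
          rw [bGo]
          simp only [splitSegment, hd, Bool.false_eq_true, if_false]
          rw [hm, imputeSegment_cons_missing]
          simp
      · -- note ≠ missing, d = false: first_valid becomes some fv here
        have hr : aLoop (splitSegment t).2 none missing = bGo (splitSegment t).2 missing :=
          IH (splitSegment t).2.length
            (by have := splitSegment_snd_length_le t; omega) _ rfl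
        rw [bGo]
        simp only [splitSegment, hd, Bool.false_eq_true, if_false]
        simp only [aLoop, hm, ne_eq, not_false_iff, if_true, if_false]
        have hif : (if false = true then (none : Option String) else some ("[background] " ++ note)) = some ("[background] " ++ note) := rfl
        rw [hif, aLoop_some, hr]
        simp only [imputeSegment, List.dropWhile, List.takeWhile, hm, decide_false]
        simp [hm]

-- ===== VERDICT (by name: the statement is the Claim_ definition above) =====
theorem impute_notes_with_background_spec : Claim_equal_impute_notes_with_background := by
  intro notes done missing _
  unfold Spec_impute_notes_with_background impute_notes_with_background impute_notes_with_background_alt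
  exact aLoop_eq_bGo _ _
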